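-- pv_equiv track=rewrite | github.com/Georgmel4757/40-Exercises | Chapter 2/ex-3.py | canComplete
-- ===== SOURCE A (Python) =====
-- def canComplete(signs, line):
--     last_position = 0
--
--     for letter in signs:
--         position = line.find(letter)
--         if position != -1 and position >= last_position:
--             line = line.replace(letter, "", 1)
--             last_position = position
--         else:
--             return False
--
--     return True
-- ===== SOURCE B (Python) =====
-- def canComplete(signs, line):
--     # Index the line once: positions[ch] = ascending list of indices of ch.
--     positions = {}
--     for i, ch in enumerate(line):
--         positions.setdefault(ch, []).append(i)
--     # Greedy: each sign consumes the first still-unused occurrence of its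
--     # letter; it must sit strictly after the previously consumed index.
--     taken = {}
--     last = -1
--     for letter in signs:
--         occ = positions.get(letter, [])
--         k = taken.get(letter, 0)
--         if k >= len(occ) or occ[k] <= last:
--             return False
--         last = occ[k]
--         taken[letter] = k + 1
--     return True
-- ===== Notes on version B (the rewrite author's own statement) =====
-- stated objective: faster
-- what changed: Instead of re-scanning and rebuilding a shrinking copy of the line with find/replace for every sign, B indexes the line once into per-letter ascending position lists and walks the signs consuming each letter's first unused occurrence, which must lie strictly after the previously consumed index.
import Mathlib
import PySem

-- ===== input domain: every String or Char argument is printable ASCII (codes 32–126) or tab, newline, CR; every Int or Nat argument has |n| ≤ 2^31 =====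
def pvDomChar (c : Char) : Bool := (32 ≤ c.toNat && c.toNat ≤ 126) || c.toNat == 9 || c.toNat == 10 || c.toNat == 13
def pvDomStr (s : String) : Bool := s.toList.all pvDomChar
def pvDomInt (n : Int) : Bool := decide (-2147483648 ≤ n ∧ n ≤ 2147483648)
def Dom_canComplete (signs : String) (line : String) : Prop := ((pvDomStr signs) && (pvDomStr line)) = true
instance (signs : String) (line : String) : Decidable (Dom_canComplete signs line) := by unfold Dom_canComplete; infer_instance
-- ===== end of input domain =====

-- B replaces A's repeated find/replace scans of a shrinking copy of the line with a one-pass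
-- per-letter position index consumed greedily; objective: faster (asymptotic, O(m·n) → O(m+n)).

-- ===== PORT A =====
-- hand port of line.replace(letter, "", 1) for a single-char pattern: remove the first
-- occurrence, keep the string unchanged if absent (exact for this call shape)
def pvReplaceOnce (cs : List Char) (c : Char) : List Char :=
  match cs with
  | [] => []
  | x :: t => if x == c then t else x :: pvReplaceOnce t c

def canCompleteGo (sg : List Char) (line : List Char) (last : Int) : Bool :=
  match sg with
  | [] => true
  | letter :: rest =>
    let position := PySem.Chars.find line [letter]
    if position ≠ -1 ∧ position ≥ last then
      canCompleteGo rest (pvReplaceOnce line letter) position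
    else false

def canComplete (signs : String) (line : String) : Bool :=
  canCompleteGo signs.toList line.toList 0

-- ===== PORT B =====
-- positions[ch] = ascending list of the indices of ch in line, built by one pass
def pvBuildPositions (cs : List Char) : PySem.Dict Char (List Int) :=
  (PySem.List.enumerate cs).foldl
    (fun d p => d.insert p.2 (d.getD p.2 [] ++ [p.1])) PySem.Dict.empty

-- greedy pass over signs; taken[ch] = how many occurrences of ch were already consumed.
-- occ.getD k 0 ports occ[k]: Python's `or` short-circuits, so occ[k] is only read when k < len(occ)
def pvAltGo (sg : List Char) (positions : PySem.Dict Char (List Int))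
    (taken : PySem.Dict Char Nat) (last : Int) : Bool :=
  match sg with
  | [] => true
  | letter :: rest =>
    let occ := positions.getD letter []
    let k := taken.getD letter 0
    if occ.length ≤ k ∨ occ.getD k 0 ≤ last then false
    else pvAltGo rest positions (taken.insert letter (k + 1)) (occ.getD k 0)

def canComplete_alt (signs : String) (line : String) : Bool :=
  pvAltGo signs.toList (pvBuildPositions line.toList) PySem.Dict.empty (-1)

-- ===== PRECONDITION & SPEC =====
def Spec_canComplete (signs : String) (line : String) (out : Bool) : Prop := out = canComplete_alt signs line
instance (signs : String) (line : String) (out : Bool) : Decidable (Spec_canComplete signs line out) := by unfold Spec_canComplete; infer_instance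

-- ===== CLAIM (what is proved, stated in full; the proofs are below) =====
def Claim_equal_canComplete : Prop := ∀ (signs : String) (line : String), Dom_canComplete signs line → Spec_canComplete signs line (canComplete signs line)

-- ===== LEMMAS AND PROOFS =====

-- reference process, used only by the proofs: the remaining line kept as (original index, char) pairs
def pvRefGo (sg : List Char) (E : List (Int × Char)) (lastO : Int) : Bool :=
  match sg with
  | [] => true
  | c :: rest =>
    if c ∈ E.map Prod.snd then
      let j := (E.map Prod.snd).idxOf c
      let i := (E.getD j (0, c)).1
      if lastO < i then pvRefGo rest (E.eraseIdx j) i else false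
    else false

theorem pv_lt_idxOf (c : Char) (L : List Char) (i : Nat) (hi : i < L.length)
    (h : i < L.idxOf c) : ¬ (L[i] = c) := by
  simp only [List.idxOf, List.lt_findIdx_iff, beq_eq_false_iff_ne, ne_eq] at h
  obtain ⟨hlen, h'⟩ := h
  exact h' i le_rfl

theorem pv_singleton_prefix (c : Char) (M : List Char) : [c] <+: M ↔ M.head? = some c := by
  cases M with
  | nil => simp
  | cons x t => simp [List.cons_prefix_cons, eq_comm]

-- str.find for a single-char pattern is idxOf (or -1 when absent)
theorem pv_find_single (L : List Char) (c : Char) :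
    PySem.Chars.find L [c] = if c ∈ L then ((L.idxOf c : Nat) : Int) else -1 := by
  by_cases hc : c ∈ L
  · rw [if_pos hc]
    have hinf : [c] <:+: L := by
      obtain ⟨s, t, rfl⟩ := List.append_of_mem hc
      exact ⟨s, t, by simp⟩
    have h0 : 0 ≤ PySem.Chars.find L [c] := (PySem.Chars.find_nonneg_iff L [c]).mpr hinf
    obtain ⟨hpre, hmin⟩ := PySem.Chars.find_spec h0
    set k := (PySem.Chars.find L [c]).toNat with hk
    have hkL : L[k]? = some c := by
      rw [← List.head?_drop]; exact (pv_singleton_prefix c _).mp hpre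
    have hklen : k < L.length := by
      by_contra hge
      simp [List.getElem?_eq_none (le_of_not_gt hge)] at hkL
    have hidx : L.idxOf c ≤ k := by
      by_contra hlt
      exact pv_lt_idxOf c L k hklen (lt_of_not_ge hlt)
        (by have := List.getElem?_eq_getElem hklen ▸ hkL; simpa using this)
    have hidx2 : ¬ (L.idxOf c < k) := by
      intro hlt
      apply hmin _ hlt
      rw [pv_singleton_prefix, List.head?_drop]
      have := List.idxOf_lt_length_of_mem hc
      simp [List.getElem?_eq_getElem this, List.getElem_idxOf this]
    have : L.idxOf c = k := by omega
    omega
  · rw [if_neg hc, PySem.Chars.find_eq_neg_one_iff]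
    intro h
    exact hc (h.subset (by simp))

-- replace(letter, "", 1) is eraseIdx at idxOf
theorem pv_replaceOnce_eq (L : List Char) (c : Char) :
    pvReplaceOnce L c = L.eraseIdx (L.idxOf c) := by
  induction L with
  | nil => rfl
  | cons x t ih =>
    by_cases h : x = c
    · simp [pvReplaceOnce, h]
    · simp [pvReplaceOnce, h, ih]

-- A equals the reference process: the invariant ties A's position in the current (shrunken)
-- line to the original index kept in E — a current position clears last exactly when the
-- original index exceeds the last consumed original index
theorem pv_A_eq_ref (sg : List Char) : ∀ (E : List (Int × Char)) (lastC lastO : Int),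
    E.Pairwise (fun p q => p.1 < q.1) →
    (∀ i (h : i < E.length), (lastC ≤ (i : Int) ↔ lastO < (E[i]'h).1)) →
    canCompleteGo sg (E.map Prod.snd) lastC = pvRefGo sg E lastO := by
  induction sg with
  | nil => intros; rfl
  | cons c rest ih =>
    intro E lastC lastO hpw hI
    rw [canCompleteGo, pvRefGo]
    by_cases hc : c ∈ E.map Prod.snd
    · have hj : (E.map Prod.snd).idxOf c < E.length := by
        simpa using List.idxOf_lt_length_of_mem hc
      set j := (E.map Prod.snd).idxOf c with hjdef
      rw [if_pos hc]
      simp only [pv_find_single, if_pos hc, ← hjdef, List.getD_eq_getElem _ _ (by simpa using hj)]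
      have htest : ((j : Int) ≠ -1 ∧ (j : Int) ≥ lastC) ↔ lastO < (E[j]'hj).1 := by
        constructor
        · intro ⟨_, h2⟩; exact (hI j hj).mp h2
        · intro h; exact ⟨by omega, (hI j hj).mpr h⟩
      by_cases hcond : lastO < (E[j]'hj).1
      · rw [if_pos (htest.mpr hcond), if_pos hcond]
        rw [pv_replaceOnce_eq, ← hjdef, List.eraseIdx_map]
        apply ih
        · exact List.Pairwise.sublist (List.eraseIdx_sublist E j) hpw
        · intro i hi
          have hlen : (E.eraseIdx j).length = E.length - 1 := by
            rw [List.length_eraseIdx, if_pos hj]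
          have hpwg := List.pairwise_iff_getElem.mp hpw
          rw [List.getElem_eraseIdx]
          split
          · rename_i hij
            have : (E[i]'(by omega)).1 < (E[j]'hj).1 := hpwg i j (by omega) hj hij
            constructor
            · intro h; omega
            · intro h; omega
          · rename_i hij
            have hij' : j ≤ i := by omega
            have : (E[j]'hj).1 < (E[i+1]'(by omega)).1 := hpwg j (i+1) hj (by omega) (by omega)
            constructor
            · intro _; omega
            · intro _; exact_mod_cast Nat.cast_le.mpr hij'
      · rw [if_neg (fun h => hcond (htest.mp h)), if_neg hcond]
    · rw [if_neg hc]
      have : PySem.Chars.find (E.map Prod.snd) [c] = -1 := by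
        rw [pv_find_single, if_neg hc]
      simp [this]

-- the index built by B, per key
theorem pv_build_getD_gen (l : List (Int × Char)) : ∀ (d : PySem.Dict Char (List Int)) (c : Char),
    (l.foldl (fun d p => d.insert p.2 (d.getD p.2 [] ++ [p.1])) d).getD c []
      = d.getD c [] ++ (l.filter (fun p => p.2 == c)).map Prod.fst := by
  induction l with
  | nil => intro d c; simp
  | cons p t ih =>
    intro d c
    rw [List.foldl_cons, ih]
    by_cases h : p.2 = c
    · simp [h]
    · simp [PySem.Dict.getD_insert, h, Ne.symm h]

-- erasing the first pair carrying c pops the head of c's filtered occurrence list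
-- and leaves every other letter's list unchanged
theorem pv_filter_spec (E : List (Int × Char)) (c : Char) (hc : c ∈ E.map Prod.snd) :
    (E.filter (fun p => p.2 == c)).head? = some (E.getD ((E.map Prod.snd).idxOf c) (0, c)) ∧
    (E.eraseIdx ((E.map Prod.snd).idxOf c)).filter (fun p => p.2 == c)
      = (E.filter (fun p => p.2 == c)).tail ∧
    ∀ c', c' ≠ c → (E.eraseIdx ((E.map Prod.snd).idxOf c)).filter (fun p => p.2 == c')
      = E.filter (fun p => p.2 == c') := by
  induction E with
  | nil => simp at hc
  | cons q t ih =>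
    by_cases h : q.2 = c
    · have hidx : ((q :: t).map Prod.snd).idxOf c = 0 := by
        simp [h]
      refine ⟨?_, ?_, ?_⟩
      · simp [h]
      · simp [h]
      · intro c' hne
        have hq : (q.2 == c') = false := by
          rw [h]; exact beq_eq_false_iff_ne.mpr (Ne.symm hne)
        simp [h, List.filter_cons]
        exact Ne.symm hne
    · have hc' : c ∈ t.map Prod.snd := by
        rcases List.mem_map.mp hc with ⟨p, hp, hpc⟩
        rcases List.mem_cons.mp hp with rfl | hp2
        · exact absurd hpc h
        · exact List.mem_map.mpr ⟨p, hp2, hpc⟩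
      have hidx : ((q :: t).map Prod.snd).idxOf c = (t.map Prod.snd).idxOf c + 1 := by
        simp [h]
      obtain ⟨ih1, ih2, ih3⟩ := ih hc'
      refine ⟨?_, ?_, ?_⟩
      · simp [h, ih1]
      · simp [List.eraseIdx_cons_succ, h, ih2]
      · intro c' hne
        rw [hidx, List.eraseIdx_cons_succ, List.filter_cons, List.filter_cons, ih3 c' hne]

-- B equals the reference process: the suffix of positions[c] not yet consumed is exactly
-- the occurrence list of c among the remaining pairs
theorem pv_B_eq_ref (sg : List Char) : ∀ (E : List (Int × Char))
    (positions : PySem.Dict Char (List Int)) (taken : PySem.Dict Char Nat) (lastO : Int),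
    (∀ c, (positions.getD c []).drop (taken.getD c 0) = (E.filter (fun p => p.2 == c)).map Prod.fst) →
    pvAltGo sg positions taken lastO = pvRefGo sg E lastO := by
  induction sg with
  | nil => intros; rfl
  | cons c rest ih =>
    intro E positions taken lastO hInv
    rw [pvAltGo, pvRefGo]
    by_cases hc : c ∈ E.map Prod.snd
    · rw [if_pos hc]
      obtain ⟨hhead, htail, hother⟩ := pv_filter_spec E c hc
      set j := (E.map Prod.snd).idxOf c with hjdef
      set occ := positions.getD c [] with hocc
      set k := taken.getD c 0 with hk
      have hdrop : occ.drop k = (E.filter (fun p => p.2 == c)).map Prod.fst := hInv c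
      have hne : occ.drop k ≠ [] := by
        rw [hdrop]
        intro hnil
        rw [List.map_eq_nil_iff] at hnil
        rw [hnil] at hhead
        simp at hhead
      have hklt : k < occ.length := by
        by_contra hge
        exact hne (List.drop_eq_nil_iff.mpr (by omega))
      have hget : occ.getD k 0 = (E.getD j (0, c)).1 := by
        rw [List.getD_eq_getElem?_getD, ← List.head?_drop, hdrop, List.head?_map, hhead]
        rfl
      by_cases hcond : lastO < (E.getD j (0, c)).1
      · rw [if_pos hcond]
        have hno : ¬(occ.length ≤ k ∨ occ.getD k 0 ≤ lastO) := by
          rw [hget]; omega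
        rw [if_neg hno]
        rw [hget]
        apply ih
        intro c'
        by_cases hcc : c' = c
        · subst hcc
          rw [PySem.Dict.getD_insert, if_pos rfl, ← hocc, htail, List.map_tail, ← hdrop,
            List.tail_drop]
        · rw [PySem.Dict.getD_insert, if_neg hcc, hother c' hcc]
          exact hInv c'
      · rw [if_neg hcond, if_pos (Or.inr (by omega))]
    · rw [if_neg hc]
      have hfil : E.filter (fun p => p.2 == c) = [] := by
        rw [List.filter_eq_nil_iff]
        intro p hp
        simp only [beq_iff_eq]
        intro hpc
        exact hc (List.mem_map.mpr ⟨p, hp, hpc⟩)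
      have : (positions.getD c []).drop (taken.getD c 0) = [] := by rw [hInv c, hfil]; rfl
      rw [if_pos (Or.inl (List.drop_eq_nil_iff.mp this))]

-- ===== VERDICT (by name: the statement is the Claim_ definition above) =====
theorem canComplete_spec : Claim_equal_canComplete := by
  intro signs line _
  unfold Spec_canComplete canComplete canComplete_alt
  have hA : canCompleteGo signs.toList line.toList 0
      = pvRefGo signs.toList (PySem.List.enumerate line.toList 0) (-1) := by
    conv_lhs => rw [show line.toList = List.map Prod.snd (PySem.List.enumerate line.toList 0) from
      (PySem.List.map_snd_enumerate line.toList 0).symm]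
    apply pv_A_eq_ref
    · exact PySem.List.pairwise_lt_enumerate _ _
    · intro i h
      rw [PySem.List.getElem_enumerate]
      simp
      omega
  have hB : pvAltGo signs.toList (pvBuildPositions line.toList) PySem.Dict.empty (-1)
      = pvRefGo signs.toList (PySem.List.enumerate line.toList 0) (-1) := by
    apply pv_B_eq_ref
    intro c
    rw [pvBuildPositions, pv_build_getD_gen]
    simp [pysem]
  rw [hA, hB]
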